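-- pv_equiv track=rewrite | github.com/valentinkm/FoundationalRepresentations | src/analysis/analyze_results.py | categorize_norm
-- ===== SOURCE A (Python) =====
-- def categorize_norm(name):
--     name = name.lower()
--     if any(x in name for x in ['visual', 'haptic', 'auditory', 'gustatory', 'olfactory', 'interoceptive', 'sensorimotor', 'perceptual', 'action', 'motor', 'body', 'mouth', 'hand', 'foot', 'head']):
--         return 'Sensorimotor'
--     if any(x in name for x in ['valence', 'arousal', 'dominance', 'happiness', 'fear', 'sadness', 'anger', 'disgust', 'emotion']):
--         return 'Emotion'
--     if any(x in name for x in ['concreteness', 'imageability', 'familiarity', 'semantic', 'abstractness']):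
--         return 'Semantic'
--     if any(x in name for x in ['aoa', 'age', 'acquisition']):
--         return 'Age of Acquisition'
--     if any(x in name for x in ['frequency', 'length', 'letters', 'phonemes', 'syllables']):
--         return 'Lexical'
--     if 'social' in name:
--         return 'Social'
--     return 'Other'
-- ===== SOURCE B (Python) =====
-- GROUPS = [
--     ['visual', 'haptic', 'auditory', 'gustatory', 'olfactory', 'interoceptive', 'sensorimotor', 'perceptual', 'action', 'motor', 'body', 'mouth', 'hand', 'foot', 'head'],
--     ['valence', 'arousal', 'dominance', 'happiness', 'fear', 'sadness', 'anger', 'disgust', 'emotion'],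
--     ['concreteness', 'imageability', 'familiarity', 'semantic', 'abstractness'],
--     ['aoa', 'age', 'acquisition'],
--     ['frequency', 'length', 'letters', 'phonemes', 'syllables'],
--     ['social'],
-- ]
-- LABELS = ['Sensorimotor', 'Emotion', 'Semantic', 'Age of Acquisition', 'Lexical', 'Social']
-- KEYWORD_INDEX = [(kw, i) for i, kws in enumerate(GROUPS) for kw in kws]
--
--
-- def categorize_norm(name):
--     name = name.lower()
--     hits = [i for kw, i in KEYWORD_INDEX if kw in name]
--     return LABELS[min(hits)] if hits else 'Other'
-- ===== Notes on version B (the rewrite author's own statement) =====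
-- stated objective: alternative
-- what changed: Instead of an ordered early-return chain of per-category checks, B makes one flat pass over all (keyword, priority) pairs collecting the priority indices of every matching keyword and then returns the label of the minimum index (or 'Other' if none matched); correctness holds because the first matching category in A's precedence order is exactly the matching category of minimal index.
import Mathlib
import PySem

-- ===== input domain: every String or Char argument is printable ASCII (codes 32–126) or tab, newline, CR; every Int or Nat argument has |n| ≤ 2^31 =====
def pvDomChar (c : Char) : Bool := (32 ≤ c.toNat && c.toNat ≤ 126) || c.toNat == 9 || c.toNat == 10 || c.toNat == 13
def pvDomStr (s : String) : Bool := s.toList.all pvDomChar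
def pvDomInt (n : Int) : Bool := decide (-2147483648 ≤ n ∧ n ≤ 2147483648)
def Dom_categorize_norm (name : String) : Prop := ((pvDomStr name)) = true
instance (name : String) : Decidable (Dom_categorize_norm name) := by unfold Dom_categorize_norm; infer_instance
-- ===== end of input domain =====

-- B replaces A's ordered early-return chain by one flat pass collecting the priority
-- indices of all matching keywords, then takes the minimum index (alternative; same cost).

-- ===== PORT A =====
def categorize_norm (name : String) : String :=
  let name := PySem.Str.lower name
  if ["visual", "haptic", "auditory", "gustatory", "olfactory", "interoceptive", "sensorimotor", "perceptual", "action", "motor", "body", "mouth", "hand", "foot", "head"].any (fun x => PySem.Str.isIn x name) then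
    "Sensorimotor"
  else if ["valence", "arousal", "dominance", "happiness", "fear", "sadness", "anger", "disgust", "emotion"].any (fun x => PySem.Str.isIn x name) then
    "Emotion"
  else if ["concreteness", "imageability", "familiarity", "semantic", "abstractness"].any (fun x => PySem.Str.isIn x name) then
    "Semantic"
  else if ["aoa", "age", "acquisition"].any (fun x => PySem.Str.isIn x name) then
    "Age of Acquisition"
  else if ["frequency", "length", "letters", "phonemes", "syllables"].any (fun x => PySem.Str.isIn x name) then
    "Lexical"
  else if PySem.Str.isIn "social" name then
    "Social"
  else
    "Other"

-- ===== PORT B =====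
def pvGroups : List (List String) :=
  [["visual", "haptic", "auditory", "gustatory", "olfactory", "interoceptive", "sensorimotor", "perceptual", "action", "motor", "body", "mouth", "hand", "foot", "head"],
   ["valence", "arousal", "dominance", "happiness", "fear", "sadness", "anger", "disgust", "emotion"],
   ["concreteness", "imageability", "familiarity", "semantic", "abstractness"],
   ["aoa", "age", "acquisition"],
   ["frequency", "length", "letters", "phonemes", "syllables"],
   ["social"]]

def pvLabels : List String :=
  ["Sensorimotor", "Emotion", "Semantic", "Age of Acquisition", "Lexical", "Social"]

-- KEYWORD_INDEX = [(kw, i) for i, kws in enumerate(GROUPS) for kw in kws]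
def pvKeywordIndex : List (String × Int) :=
  (PySem.List.enumerate pvGroups 0).flatMap (fun x => x.2.map (fun kw => (kw, x.1)))

def categorize_norm_alt (name : String) : String :=
  let name := PySem.Str.lower name
  -- hits = [i for kw, i in KEYWORD_INDEX if kw in name]
  let hits := pvKeywordIndex.filterMap
    (fun q => if PySem.Str.isIn q.1 name then some q.2 else none)
  -- return LABELS[min(hits)] if hits else 'Other'
  match PySem.List.min? hits (fun i => i) with
  | none => "Other"
  | some i => (PySem.List.pyGet? pvLabels i).getD "Other"  -- index is always in range (0..5)

-- ===== PRECONDITION & SPEC =====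
def Spec_categorize_norm (name : String) (out : String) : Prop := out = categorize_norm_alt name
instance (name : String) (out : String) : Decidable (Spec_categorize_norm name out) := by unfold Spec_categorize_norm; infer_instance

-- ===== CLAIM (what is proved, stated in full; the proofs are below) =====
def Claim_equal_categorize_norm : Prop := ∀ (name : String), Dom_categorize_norm name → Spec_categorize_norm name (categorize_norm name)

-- ===== LEMMAS AND PROOFS =====

-- generic 'hits' list of B for an arbitrary predicate, start index and group table
def pvHitsOf (p : String → Bool) (s : Int) (gs : List (List String)) : List Int :=
  ((PySem.List.enumerate gs s).flatMap (fun x => x.2.map (fun kw => (kw, x.1)))).filterMap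
    (fun q => if p q.1 then some q.2 else none)

-- index of the first group containing a matching keyword (A's precedence)
def pvFirstIdx (p : String → Bool) (s : Int) : List (List String) → Option Int
  | [] => none
  | g :: rest => if g.any p then some s else pvFirstIdx p (s + 1) rest

theorem pvHitsOf_nil (p : String → Bool) (s : Int) : pvHitsOf p s [] = [] := rfl

theorem pvHitsOf_cons (p : String → Bool) (s : Int) (g : List String) (gs : List (List String)) :
    pvHitsOf p s (g :: gs)
      = g.filterMap (fun kw => if p kw then some s else none) ++ pvHitsOf p (s + 1) gs := by
  simp [pvHitsOf, PySem.List.enumerate_cons, List.filterMap_append, List.filterMap_map,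
    Function.comp]

theorem pvBlock_mem {p : String → Bool} {s : Int} {g : List String} {x : Int}
    (hx : x ∈ g.filterMap (fun kw => if p kw then some s else none)) : x = s := by
  rcases List.mem_filterMap.mp hx with ⟨kw, _, h⟩
  by_cases hp : p kw <;> simp [hp] at h
  omega

theorem pvBlock_eq_nil_iff {p : String → Bool} {s : Int} {g : List String} :
    g.filterMap (fun kw => if p kw then some s else none) = [] ↔ g.any p = false := by
  rw [List.filterMap_eq_nil_iff, List.any_eq_false]
  constructor
  · intro h kw hkw hp
    have := h kw hkw
    simp [hp] at this
  · intro h kw hkw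
    simp [h kw hkw]

theorem pvHitsOf_lb (p : String → Bool) (gs : List (List String)) :
    ∀ (s : Int) (x : Int), x ∈ pvHitsOf p s gs → s ≤ x := by
  induction gs with
  | nil => intro s x hx; simp [pvHitsOf_nil] at hx
  | cons g rest ih =>
    intro s x hx
    rw [pvHitsOf_cons] at hx
    rcases List.mem_append.mp hx with h | h
    · have := pvBlock_mem h; omega
    · have := ih (s + 1) x h; omega

theorem pvFirstIdx_none (p : String → Bool) (gs : List (List String)) :
    ∀ (s : Int), pvFirstIdx p s gs = none → pvHitsOf p s gs = [] := by
  induction gs with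
  | nil => intro s _; rfl
  | cons g rest ih =>
    intro s h
    rw [pvFirstIdx] at h
    by_cases hg : g.any p
    · simp [hg] at h
    · rw [pvHitsOf_cons, pvBlock_eq_nil_iff.mpr (by simpa using hg), List.nil_append]
      exact ih (s + 1) (by simpa [hg] using h)

theorem pvFirstIdx_some (p : String → Bool) (gs : List (List String)) :
    ∀ (s m : Int), pvFirstIdx p s gs = some m →
      m ∈ pvHitsOf p s gs ∧ ∀ x ∈ pvHitsOf p s gs, m ≤ x := by
  induction gs with
  | nil => intro s m h; simp [pvFirstIdx] at h
  | cons g rest ih =>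
    intro s m h
    rw [pvFirstIdx] at h
    by_cases hg : g.any p
    · simp [hg] at h
      subst h
      rcases List.any_eq_true.mp hg with ⟨kw, hkw, hp⟩
      constructor
      · rw [pvHitsOf_cons]
        exact List.mem_append.mpr (Or.inl (List.mem_filterMap.mpr ⟨kw, hkw, by simp [hp]⟩))
      · intro x hx
        rw [pvHitsOf_cons] at hx
        rcases List.mem_append.mp hx with hx | hx
        · have := pvBlock_mem hx; omega
        · have := pvHitsOf_lb p rest (s + 1) x hx; omega
    · simp [hg] at h
      obtain ⟨hm, hmin⟩ := ih (s + 1) m h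
      have hblk : g.filterMap (fun kw => if p kw then some s else none) = [] :=
        pvBlock_eq_nil_iff.mpr (by simpa using hg)
      rw [pvHitsOf_cons, hblk, List.nil_append]
      exact ⟨hm, hmin⟩

theorem pvMin?_hits (p : String → Bool) (s : Int) (gs : List (List String)) :
    PySem.List.min? (pvHitsOf p s gs) (fun i => i) = pvFirstIdx p s gs := by
  cases hf : pvFirstIdx p s gs with
  | none => rw [pvFirstIdx_none p gs s hf]; rfl
  | some m =>
    obtain ⟨hm, hmin⟩ := pvFirstIdx_some p gs s m hf
    cases hmn : PySem.List.min? (pvHitsOf p s gs) (fun i => i) with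
    | none =>
      rw [PySem.List.min?_eq_none_iff] at hmn
      rw [hmn] at hm
      simp at hm
    | some x =>
      have hx : x ∈ pvHitsOf p s gs := PySem.List.min?_mem hmn
      have h1 : x ≤ m := PySem.List.min?_isMin hmn m hm
      have h2 : m ≤ x := hmin x hx
      congr 1
      omega

theorem categorize_norm_eq_alt (name : String) :
    categorize_norm name = categorize_norm_alt name := by
  unfold categorize_norm categorize_norm_alt
  have hk : ∀ (n : String),
      pvKeywordIndex.filterMap (fun q => if PySem.Str.isIn q.1 n then some q.2 else none)
        = pvHitsOf (fun kw => PySem.Str.isIn kw n) 0 pvGroups := by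
    intro n; rfl
  simp only [hk, pvMin?_hits]
  simp only [pvFirstIdx, pvGroups]
  split_ifs with h1 h2 h3 h4 h5 h6 <;>
    simp_all [List.any_cons, List.any_nil] <;> rfl

-- ===== VERDICT (by name: the statement is the Claim_ definition above) =====
theorem categorize_norm_spec : Claim_equal_categorize_norm := by
  intro name _
  unfold Spec_categorize_norm
  exact categorize_norm_eq_alt name
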